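-- pv_equiv track=rewrite | github.com/eden-fenster/projects_2022 | practice/weights.py | weights_sum
-- ===== SOURCE A (Python) =====
-- from typing import List
--
-- def weights_sum(a: List[int], i: int, j: int, sum_of_weights: int) -> bool:
--     if i >= len(a) - 1 or j <= 0:
--         return False
--
--     if a[i] + a[j] == sum_of_weights or a[i] == sum_of_weights or a[j] == sum_of_weights:
--         return True
--
--     return \
--         weights_sum(a=a, i=i + 1, j=j, sum_of_weights=sum_of_weights) and \
--         weights_sum(a=a, i=i, j=j - 1, sum_of_weights=sum_of_weights) or \
--         (weights_sum(a=a, i=i + 1, j=j, sum_of_weights=sum_of_weights) or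
--          weights_sum(a=a, i=i, j=j - 1, sum_of_weights=sum_of_weights))
-- ===== SOURCE B (Python) =====
-- def weights_sum(a, i, j, sum_of_weights):
--     n = len(a)
--     if i >= n - 1 or j <= 0:
--         return False
--     xs = [a[x] for x in range(i, n - 1)]
--     ys = [a[y] for y in range(1, j + 1)]
--     if sum_of_weights in xs or sum_of_weights in ys:
--         return True
--     yset = set(ys)
--     return any(sum_of_weights - v in yset for v in xs)
-- ===== Notes on version B (the rewrite author's own statement) =====
-- stated objective: alternative
-- what changed: Replaced the branching recursion (whose (X and Y) or (X or Y) combiner is just X or Y, i.e. an OR over the rectangle of reachable index pairs) by two linear index scans plus a set of pair-sum complements.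
import Mathlib
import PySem

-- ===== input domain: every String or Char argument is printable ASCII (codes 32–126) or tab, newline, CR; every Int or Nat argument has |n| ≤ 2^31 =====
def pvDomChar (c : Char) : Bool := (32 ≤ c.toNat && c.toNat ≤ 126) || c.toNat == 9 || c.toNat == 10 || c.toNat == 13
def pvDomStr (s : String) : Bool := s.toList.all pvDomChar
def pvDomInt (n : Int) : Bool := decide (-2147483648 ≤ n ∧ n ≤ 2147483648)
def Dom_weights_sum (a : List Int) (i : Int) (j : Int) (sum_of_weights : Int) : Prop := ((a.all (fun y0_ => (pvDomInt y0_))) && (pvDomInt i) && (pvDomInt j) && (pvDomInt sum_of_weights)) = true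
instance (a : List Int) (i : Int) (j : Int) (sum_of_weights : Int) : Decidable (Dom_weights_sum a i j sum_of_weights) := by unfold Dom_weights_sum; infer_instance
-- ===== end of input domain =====

-- B replaces A's branching double recursion by two linear index scans plus a set of
-- pair-sum complements; return values agree on all of Pre_.

-- ===== PORT A =====
-- literal transliteration of A's recursion (fuel = the decreasing measure)
-- fuel = the measure ((len-1-i).toNat + j.toNat): it shrinks by exactly 1 at each
-- recursive call, and at fuel 0 the Python guard is already true, so `false` is exact.
def weightsGo (a : List Int) (s : Int) : Nat → Int → Int → Bool
  | 0, _, _ => false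
  | fuel + 1, i, j =>
    if i ≥ (a.length : Int) - 1 ∨ j ≤ 0 then false
    else
      match PySem.List.pyGet? a i, PySem.List.pyGet? a j with
      | some ai, some aj =>
          if ai + aj = s ∨ ai = s ∨ aj = s then true
          else
            (weightsGo a s fuel (i + 1) j && weightsGo a s fuel i (j - 1))
            || (weightsGo a s fuel (i + 1) j || weightsGo a s fuel i (j - 1))
      | _, _ => false

def weights_sum (a : List Int) (i : Int) (j : Int) (sum_of_weights : Int) : Bool :=
  weightsGo a sum_of_weights (((a.length : Int) - 1 - i).toNat + j.toNat) i j

-- ===== PORT B =====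
-- literal transliteration of Source B; the comprehensions [a[x] for x in range(...)] become
-- filterMap pyGet? over pyRange (inside Pre_ every lookup succeeds, matching Python exactly)
def weights_sum_alt (a : List Int) (i : Int) (j : Int) (sum_of_weights : Int) : Bool :=
  let n : Int := a.length
  if i ≥ n - 1 ∨ j ≤ 0 then false
  else
    let xs := (PySem.List.pyRange i (n - 1) 1).filterMap (fun x => PySem.List.pyGet? a x)
    let ys := (PySem.List.pyRange 1 (j + 1) 1).filterMap (fun y => PySem.List.pyGet? a y)
    if xs.contains sum_of_weights || ys.contains sum_of_weights then true
    else
      let yset : PySem.Set Int := PySem.Set.ofList ys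
      xs.any (fun v => yset.contains (sum_of_weights - v))

-- ===== PRECONDITION & SPEC =====
-- Pre_ excludes exactly the inputs on which A raises IndexError: the guard fails (so a[i] and
-- a[j] are accessed) while i < -len(a) or j > len(a) - 1.
def Pre_weights_sum (a : List Int) (i : Int) (j : Int) (sum_of_weights : Int) : Prop :=
  (i ≥ (a.length : Int) - 1 ∨ j ≤ 0) ∨ (-(a.length : Int) ≤ i ∧ j ≤ (a.length : Int) - 1)
instance (a : List Int) (i : Int) (j : Int) (sum_of_weights : Int) : Decidable (Pre_weights_sum a i j sum_of_weights) := by unfold Pre_weights_sum; infer_instance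

def pvWitness_weights_sum : List Int × Int × Int × Int := ([3, 1, 4, 1], 0, 3, 5)

def Spec_weights_sum (a : List Int) (i : Int) (j : Int) (sum_of_weights : Int) (out : Bool) : Prop := out = weights_sum_alt a i j sum_of_weights
instance (a : List Int) (i : Int) (j : Int) (sum_of_weights : Int) (out : Bool) : Decidable (Spec_weights_sum a i j sum_of_weights out) := by unfold Spec_weights_sum; infer_instance

-- ===== CLAIM (what is proved, stated in full; the proofs are below) =====
def Claim_equal_weights_sum : Prop := ∀ (a : List Int) (i : Int) (j : Int) (sum_of_weights : Int), Dom_weights_sum a i j sum_of_weights → Pre_weights_sum a i j sum_of_weights → Spec_weights_sum a i j sum_of_weights (weights_sum a i j sum_of_weights)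

-- ===== LEMMAS AND PROOFS =====

def wsCond (a : List Int) (s x y : Int) : Prop :=
  PySem.List.pyGetD a x 0 + PySem.List.pyGetD a y 0 = s ∨
  PySem.List.pyGetD a x 0 = s ∨ PySem.List.pyGetD a y 0 = s

def wsEx (a : List Int) (s i j : Int) : Prop :=
  ∃ x y : Int, i ≤ x ∧ x < (a.length : Int) - 1 ∧ 1 ≤ y ∧ y ≤ j ∧ wsCond a s x y

theorem pyGet?_eq_some_getD (a : List Int) (x : Int)
    (h1 : -(a.length : Int) ≤ x) (h2 : x < a.length) :
    PySem.List.pyGet? a x = some (PySem.List.pyGetD a x 0) := by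
  cases h : PySem.List.pyGet? a x with
  | none =>
    rw [PySem.List.pyGet?_eq_none_iff] at h
    exact absurd (by simp [PySem.Raise.InRange]; omega) h
  | some v => simp [PySem.List.pyGetD, h]

theorem A_char (m : Nat) : ∀ (a : List Int) (s i j : Int),
    (((a.length : Int) - 1 - i).toNat + j.toNat = m) →
    -(a.length : Int) ≤ i → j ≤ (a.length : Int) - 1 →
    (weightsGo a s m i j = true ↔ wsEx a s i j) := by
  induction m with
  | zero =>
    intro a s i j hm h1 h2
    simp only [weightsGo, Bool.false_eq_true, false_iff]
    rintro ⟨x, y, hx1, hx2, hy1, hy2, -⟩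
    omega
  | succ m IH =>
    intro a s i j hm h1 h2
    simp only [weightsGo]
    by_cases hg : i ≥ (a.length : Int) - 1 ∨ j ≤ 0
    · rw [if_pos hg]
      simp only [Bool.false_eq_true, false_iff]
      rintro ⟨x, y, hx1, hx2, hy1, hy2, -⟩
      rcases hg with hg | hg <;> omega
    · rw [if_neg hg]
      push Not at hg
      obtain ⟨hgi, hgj⟩ := hg
      rw [pyGet?_eq_some_getD a i h1 (by omega), pyGet?_eq_some_getD a j (by omega) (by omega)]
      dsimp only
      have hX := IH a s (i + 1) j (by omega) (by omega) h2
      have hY := IH a s i (j - 1) (by omega) h1 (by omega)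
      by_cases hc : PySem.List.pyGetD a i 0 + PySem.List.pyGetD a j 0 = s ∨
          PySem.List.pyGetD a i 0 = s ∨ PySem.List.pyGetD a j 0 = s
      · rw [if_pos hc]
        simp only [true_iff]
        exact ⟨i, j, le_refl _, by omega, by omega, le_refl _, hc⟩
      · rw [if_neg hc]
        constructor
        · intro h
          have hor : weightsGo a s m (i + 1) j = true ∨ weightsGo a s m i (j - 1) = true := by
            cases hXv : weightsGo a s m (i + 1) j <;>
              cases hYv : weightsGo a s m i (j - 1) <;> simp_all
          rcases hor with h' | h'
          · obtain ⟨x, y, p1, p2, p3, p4, p5⟩ := hX.mp h'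
            exact ⟨x, y, by omega, p2, p3, p4, p5⟩
          · obtain ⟨x, y, p1, p2, p3, p4, p5⟩ := hY.mp h'
            exact ⟨x, y, p1, p2, p3, by omega, p5⟩
        · rintro ⟨x, y, p1, p2, p3, p4, p5⟩
          have hor : weightsGo a s m (i + 1) j = true ∨ weightsGo a s m i (j - 1) = true := by
            by_cases hxi : i + 1 ≤ x
            · exact Or.inl (hX.mpr ⟨x, y, hxi, p2, p3, p4, p5⟩)
            · have hxeq : x = i := by omega
              have hyj : y ≤ j - 1 := by
                by_contra hyy
                have hyeq : y = j := by omega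
                rw [hxeq, hyeq] at p5
                exact hc p5
              exact Or.inr (hY.mpr ⟨x, y, p1, p2, p3, hyj, p5⟩)
          rcases hor with h' | h' <;> simp [h']

theorem B_char (a : List Int) (s i j : Int)
    (h1 : -(a.length : Int) ≤ i) (h2 : j ≤ (a.length : Int) - 1) :
    (weights_sum_alt a i j s = true ↔ wsEx a s i j) := by
  simp only [weights_sum_alt]
  by_cases hg : i ≥ (a.length : Int) - 1 ∨ j ≤ 0
  · rw [if_pos hg]
    simp only [Bool.false_eq_true, false_iff]
    rintro ⟨x, y, hx1, hx2, hy1, hy2, -⟩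
    rcases hg with hg | hg <;> omega
  · rw [if_neg hg]
    push Not at hg
    obtain ⟨hgi, hgj⟩ := hg
    have hxs : ∀ v : Int,
        v ∈ (PySem.List.pyRange i ((a.length : Int) - 1) 1).filterMap
            (fun x => PySem.List.pyGet? a x) ↔
        ∃ x, i ≤ x ∧ x < (a.length : Int) - 1 ∧ v = PySem.List.pyGetD a x 0 := by
      intro v
      simp only [List.mem_filterMap, PySem.List.mem_pyRange_one]
      constructor
      · rintro ⟨x, ⟨hxa, hxb⟩, hx3⟩
        rw [pyGet?_eq_some_getD a x (by omega) (by omega)] at hx3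
        exact ⟨x, hxa, hxb, (Option.some_inj.mp hx3).symm⟩
      · rintro ⟨x, hxa, hxb, rfl⟩
        exact ⟨x, ⟨hxa, hxb⟩, pyGet?_eq_some_getD a x (by omega) (by omega)⟩
    have hys : ∀ v : Int,
        v ∈ (PySem.List.pyRange 1 (j + 1) 1).filterMap
            (fun y => PySem.List.pyGet? a y) ↔
        ∃ y, 1 ≤ y ∧ y ≤ j ∧ v = PySem.List.pyGetD a y 0 := by
      intro v
      simp only [List.mem_filterMap, PySem.List.mem_pyRange_one]
      constructor
      · rintro ⟨y, ⟨hya, hyb⟩, hy3⟩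
        rw [pyGet?_eq_some_getD a y (by omega) (by omega)] at hy3
        exact ⟨y, hya, by omega, (Option.some_inj.mp hy3).symm⟩
      · rintro ⟨y, hya, hyb, rfl⟩
        exact ⟨y, ⟨hya, by omega⟩, pyGet?_eq_some_getD a y (by omega) (by omega)⟩
    by_cases hc :
        ((PySem.List.pyRange i ((a.length : Int) - 1) 1).filterMap
            (fun x => PySem.List.pyGet? a x)).contains s = true ∨
        ((PySem.List.pyRange 1 (j + 1) 1).filterMap
            (fun y => PySem.List.pyGet? a y)).contains s = true
    · rw [if_pos (by simp only [Bool.or_eq_true]; tauto)]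
      simp only [true_iff]
      rcases hc with hc | hc
      · simp only [List.contains_eq_mem, decide_eq_true_eq] at hc
        obtain ⟨x, hxa, hxb, hveq⟩ := (hxs s).mp hc
        exact ⟨x, j, hxa, hxb, by omega, le_refl _, Or.inr (Or.inl hveq.symm)⟩
      · simp only [List.contains_eq_mem, decide_eq_true_eq] at hc
        obtain ⟨y, hya, hyb, hveq⟩ := (hys s).mp hc
        exact ⟨i, y, le_refl _, by omega, hya, hyb, Or.inr (Or.inr hveq.symm)⟩
    · push Not at hc
      obtain ⟨hc1, hc2⟩ := hc
      rw [if_neg (by simp only [Bool.or_eq_true]; tauto)]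
      simp only [List.any_eq_true]
      constructor
      · rintro ⟨v, hv, hmem⟩
        obtain ⟨x, hxa, hxb, rfl⟩ := (hxs v).mp hv
        have : (s - PySem.List.pyGetD a x 0) ∈
            (PySem.Set.ofList ((PySem.List.pyRange 1 (j + 1) 1).filterMap
              (fun y => PySem.List.pyGet? a y)) : List Int) := by
          simpa [PySem.Set.contains] using hmem
        rw [PySem.Set.mem_ofList] at this
        obtain ⟨y, hya, hyb, hveq⟩ := (hys _).mp this
        exact ⟨x, y, hxa, hxb, hya, hyb, Or.inl (by omega)⟩
      · rintro ⟨x, y, p1, p2, p3, p4, p5⟩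
        have hxmem := (hxs (PySem.List.pyGetD a x 0)).mpr ⟨x, p1, p2, rfl⟩
        have hymem := (hys (PySem.List.pyGetD a y 0)).mpr ⟨y, p3, p4, rfl⟩
        rcases p5 with p5 | p5 | p5
        · refine ⟨PySem.List.pyGetD a x 0, hxmem, ?_⟩
          have hy' : (s - PySem.List.pyGetD a x 0) ∈
              (PySem.Set.ofList ((PySem.List.pyRange 1 (j + 1) 1).filterMap
                (fun y => PySem.List.pyGet? a y)) : List Int) := by
            rw [PySem.Set.mem_ofList]
            have : s - PySem.List.pyGetD a x 0 = PySem.List.pyGetD a y 0 := by omega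
            rw [this]; exact hymem
          simpa [PySem.Set.contains] using hy'
        · exact absurd (by simpa [List.contains_eq_mem] using (hxs s).mpr ⟨x, p1, p2, p5.symm⟩) hc1
        · exact absurd (by simpa [List.contains_eq_mem] using (hys s).mpr ⟨y, p3, p4, p5.symm⟩) hc2

-- ===== VERDICT (by name: the statement is the Claim_ definition above) =====
theorem weights_sum_spec : Claim_equal_weights_sum := by
  intro a i j s _ hpre
  unfold Spec_weights_sum
  rcases hpre with hguard | ⟨h1, h2⟩
  · have hA : weights_sum a i j s = false := by
      unfold weights_sum
      cases (((a.length : Int) - 1 - i).toNat + j.toNat) with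
      | zero => rfl
      | succ m => simp only [weightsGo]; rw [if_pos hguard]
    have hB : weights_sum_alt a i j s = false := by
      simp only [weights_sum_alt]; rw [if_pos hguard]
    rw [hA, hB]
  · have hA := A_char (((a.length : Int) - 1 - i).toNat + j.toNat) a s i j rfl h1 h2
    have hB := B_char a s i j h1 h2
    unfold weights_sum
    cases hAv : weightsGo a s (((a.length : Int) - 1 - i).toNat + j.toNat) i j <;>
      cases hBv : weights_sum_alt a i j s <;> simp_all
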